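-- pv_equiv track=rewrite | github.com/NVIDIA/nvidia-gpio-status-handler | tools/device-id-lang/ids.py | calcInputIndexToBracketPoss
-- ===== SOURCE A (Python) =====
-- def calcInputIndexToBracketPoss(bracketsInputIndexes: list):
--     # For `i' being the index of a number in the input tuple, the
--     # `result[i]' is the list of indexes the brackets in a
--     # pattern where it should be evaluated.
--     if bracketsInputIndexes:
--         n = max(bracketsInputIndexes) + 1
--         result = [[]] * n
--         for k, mi in enumerate(bracketsInputIndexes):
--             if result[mi] == []:
--                 result[mi] = [k]
--             else:
--                 result[mi] += [k]
--         return result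
--     else:
--         return []
-- ===== SOURCE B (Python) =====
-- def calcInputIndexToBracketPoss(bracketsInputIndexes: list):
--     # No grouping container at all: row i is computed independently by
--     # scanning the input for positions whose value equals i.
--     if not bracketsInputIndexes:
--         return []
--     n = max(bracketsInputIndexes) + 1
--     return [[k for k, v in enumerate(bracketsInputIndexes) if v == i]
--             for i in range(n)]
-- ===== Notes on version B (the rewrite author's own statement) =====
-- stated objective: alternative
-- what changed: Drops A's mutable max+1 table built in one pass with per-slot emptiness checks; B computes each row independently by a per-row filter scan over enumerate(input), nested passes with no grouping container.
-- outside the precondition, e.g. on calcInputIndexToBracketPoss([2, -1]): A returns [[], [], [0, 1]], B returns [[], [], [0]]; on calcInputIndexToBracketPoss([-1]): A raises IndexError, B returns []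
import Mathlib
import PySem

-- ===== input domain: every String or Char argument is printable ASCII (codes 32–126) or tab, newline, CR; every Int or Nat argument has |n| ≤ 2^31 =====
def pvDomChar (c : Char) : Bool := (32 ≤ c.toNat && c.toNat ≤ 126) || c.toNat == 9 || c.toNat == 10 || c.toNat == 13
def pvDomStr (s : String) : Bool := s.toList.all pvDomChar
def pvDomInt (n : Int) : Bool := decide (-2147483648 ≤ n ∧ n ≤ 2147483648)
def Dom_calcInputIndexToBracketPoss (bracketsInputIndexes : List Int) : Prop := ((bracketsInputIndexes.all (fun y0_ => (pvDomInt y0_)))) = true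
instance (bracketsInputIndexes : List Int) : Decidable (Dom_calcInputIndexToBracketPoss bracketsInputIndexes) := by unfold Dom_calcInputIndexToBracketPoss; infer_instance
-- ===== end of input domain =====

-- B drops A's mutable max+1 table built in one pass: each row i is computed
-- independently by filtering enumerate(input) for value i (nested passes, no
-- grouping container); same result, different structure.

-- ===== PORT A =====
def calcInputIndexToBracketPoss (bracketsInputIndexes : List Int) : List (List Int) :=
  match bracketsInputIndexes with
  | [] => []
  | x :: t =>
    let n : Int := t.foldl max x + 1
    let result : List (List Int) := PySem.List.pyRepeat [([] : List Int)] n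
    (PySem.List.enumerate (x :: t) 0).foldl
      (fun res p =>
        if PySem.List.pyGetD res p.2 ([] : List Int) = [] then
          PySem.List.pySetD res p.2 [p.1]
        else
          PySem.List.pySetD res p.2 (PySem.List.pyGetD res p.2 ([] : List Int) ++ [p.1]))
      result

-- ===== PORT B =====
def calcInputIndexToBracketPoss_alt (bracketsInputIndexes : List Int) : List (List Int) :=
  match bracketsInputIndexes with
  | [] => []
  | x :: t =>
    let n : Int := t.foldl max x + 1
    (PySem.List.pyRange 0 n 1).map (fun i =>
      ((PySem.List.enumerate (x :: t) 0).filter (fun p => p.2 == i)).map (·.1))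

-- ===== PRECONDITION & SPEC =====
-- Pre_ excludes lists containing a negative value: those are outside the function's
-- natural domain (bracket positions); there A either raises IndexError or resolves the
-- negative list index from the end, while B scans for the value itself and never matches.
def Pre_calcInputIndexToBracketPoss (bracketsInputIndexes : List Int) : Prop :=
  ∀ x ∈ bracketsInputIndexes, 0 ≤ x

instance (bracketsInputIndexes : List Int) : Decidable (Pre_calcInputIndexToBracketPoss bracketsInputIndexes) := by
  unfold Pre_calcInputIndexToBracketPoss; infer_instance

def pvWitness_calcInputIndexToBracketPoss : List Int := [1, 0, 1, 2]

def Spec_calcInputIndexToBracketPoss (bracketsInputIndexes : List Int) (out : List (List Int)) : Prop := out = calcInputIndexToBracketPoss_alt bracketsInputIndexes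
instance (bracketsInputIndexes : List Int) (out : List (List Int)) : Decidable (Spec_calcInputIndexToBracketPoss bracketsInputIndexes out) := by unfold Spec_calcInputIndexToBracketPoss; infer_instance

-- ===== CLAIM (what is proved, stated in full; the proofs are below) =====
def Claim_equal_calcInputIndexToBracketPoss : Prop := ∀ (bracketsInputIndexes : List Int), Dom_calcInputIndexToBracketPoss bracketsInputIndexes → Pre_calcInputIndexToBracketPoss bracketsInputIndexes → Spec_calcInputIndexToBracketPoss bracketsInputIndexes (calcInputIndexToBracketPoss bracketsInputIndexes)

-- ===== LEMMAS AND PROOFS =====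

-- A's loop body: both branches store the old row with the position appended.
theorem pvStepA_eq :
    (fun (res : List (List Int)) (p : Int × Int) =>
      if PySem.List.pyGetD res p.2 ([] : List Int) = [] then
        PySem.List.pySetD res p.2 [p.1]
      else
        PySem.List.pySetD res p.2 (PySem.List.pyGetD res p.2 ([] : List Int) ++ [p.1]))
    = (fun res p => PySem.List.pySetD res p.2 (PySem.List.pyGetD res p.2 ([] : List Int) ++ [p.1])) := by
  funext res p
  split_ifs with h
  · rw [h, List.nil_append]
  · rfl

-- A's loop preserves the length of the result table.
theorem pvLenA (l : List (Int × Int)) (res : List (List Int)) :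
    (l.foldl (fun res p => PySem.List.pySetD res p.2 (PySem.List.pyGetD res p.2 ([] : List Int) ++ [p.1])) res).length
      = res.length := by
  induction l generalizing res with
  | nil => rfl
  | cons p l ih => simp [ih, PySem.List.length_pySetD]

-- A's table after the loop, row by row (all keys non-negative and in range).
theorem pvFoldA (l : List (Int × Int)) (res : List (List Int))
    (h : ∀ p ∈ l, 0 ≤ p.2 ∧ p.2 < (res.length : Int)) (j : Nat) (hj : j < res.length) :
    (l.foldl (fun res p => PySem.List.pySetD res p.2 (PySem.List.pyGetD res p.2 ([] : List Int) ++ [p.1])) res).getD j []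
      = res.getD j [] ++ (l.filter (fun p => p.2 == (j : Int))).map (·.1) := by
  induction l generalizing res with
  | nil => simp
  | cons p l ih =>
    obtain ⟨hp0, hplt⟩ := h p (by simp)
    have hlen : p.2.toNat < res.length := by omega
    have hget : PySem.List.pyGetD res p.2 ([] : List Int) = res[p.2.toNat] :=
      PySem.List.pyGetD_eq_getElem res ([] : List Int) hp0 hplt
    have hset : PySem.List.pySetD res p.2 (PySem.List.pyGetD res p.2 ([] : List Int) ++ [p.1])
        = res.set p.2.toNat (res[p.2.toNat] ++ [p.1]) := by
      rw [hget]; exact PySem.List.pySetD_of_nonneg res _ hp0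
    simp only [List.foldl_cons, hset, List.filter_cons]
    rw [ih _ (by simpa using fun q hq => h q (by simp [hq])) (by simpa using hj)]
    by_cases hc : p.2 = (j : Int)
    · have hn : p.2.toNat = j := by omega
      have : (p.2 == (j : Int)) = true := by simp [hc]
      simp [this, hn, List.getD, hj]
    · have hn : p.2.toNat ≠ j := by omega
      have : (p.2 == (j : Int)) = false := by simp [hc]
      simp [this, List.getD_eq_getElem?_getD, hn]

-- ===== VERDICT (by name: the statement is the Claim_ definition above) =====
theorem calcInputIndexToBracketPoss_spec : Claim_equal_calcInputIndexToBracketPoss := by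
  intro l _hDom hPre
  unfold Spec_calcInputIndexToBracketPoss
  cases l with
  | nil => rfl
  | cons x t =>
    have hA : calcInputIndexToBracketPoss (x :: t)
        = (PySem.List.enumerate (x :: t) 0).foldl
            (fun res p =>
              if PySem.List.pyGetD res p.2 ([] : List Int) = [] then
                PySem.List.pySetD res p.2 [p.1]
              else
                PySem.List.pySetD res p.2 (PySem.List.pyGetD res p.2 ([] : List Int) ++ [p.1]))
            (PySem.List.pyRepeat [([] : List Int)] (t.foldl max x + 1)) := rfl
    have hB : calcInputIndexToBracketPoss_alt (x :: t)
        = (PySem.List.pyRange 0 (t.foldl max x + 1) 1).map (fun i =>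
            ((PySem.List.enumerate (x :: t) 0).filter (fun p => p.2 == i)).map (·.1)) := rfl
    rw [hA, hB, pvStepA_eq]
    set mx : Int := t.foldl max x with hmx
    have hx0 : (0 : Int) ≤ x := hPre x (by simp)
    have hmx0 : 0 ≤ mx := le_trans hx0 (PySem.List.le_foldl_max t x).1
    have hmem_le : ∀ y ∈ x :: t, y ≤ mx := by
      intro y hy
      rcases List.mem_cons.mp hy with h | h
      · rw [h]; exact (PySem.List.le_foldl_max t x).1
      · exact (PySem.List.le_foldl_max t x).2 y h
    have hncast : ((mx + 1).toNat : Int) = mx + 1 := by omega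
    rw [PySem.List.pyRepeat_singleton]
    have hkeys : ∀ p ∈ PySem.List.enumerate (x :: t) 0,
        0 ≤ p.2 ∧ p.2 < ((List.replicate (mx + 1).toNat ([] : List Int)).length : Int) := by
      intro p hp
      obtain ⟨k, hk, rfl⟩ := (PySem.List.mem_enumerate_iff (x :: t) 0 p).mp hp
      have hmem : (x :: t)[k] ∈ x :: t := List.getElem_mem hk
      refine ⟨hPre _ hmem, ?_⟩
      have := hmem_le _ hmem
      simp only [List.length_replicate]
      omega
    apply List.ext_getElem
    · rw [pvLenA, List.length_replicate, List.length_map, ← hncast,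
        PySem.List.pyRange_zero_natCast, List.length_map, List.length_range]
      omega
    · intro j hjA hjB
      have hjn : j < (mx + 1).toNat := by
        have := hjA; rwa [pvLenA, List.length_replicate] at this
      have hA2 : (((PySem.List.enumerate (x :: t) 0).foldl
            (fun res p => PySem.List.pySetD res p.2 (PySem.List.pyGetD res p.2 ([] : List Int) ++ [p.1]))
            (List.replicate (mx + 1).toNat ([] : List Int)))).getD j []
          = ((PySem.List.enumerate (x :: t) 0).filter (fun p => p.2 == (j : Int))).map (·.1) := by
        rw [pvFoldA _ _ hkeys j (by simpa using hjn)]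
        simp
      have hB2 : ((PySem.List.pyRange 0 (mx + 1) 1).map (fun i =>
            ((PySem.List.enumerate (x :: t) 0).filter (fun p => p.2 == i)).map (·.1)))[j]?
          = some (((PySem.List.enumerate (x :: t) 0).filter (fun p => p.2 == (j : Int))).map (·.1)) := by
        rw [← hncast, PySem.List.getElem?_map_pyRange_zero _ _ _ hjn]
      have hgA := List.getD_eq_getElem?_getD (l := ((PySem.List.enumerate (x :: t) 0).foldl
            (fun res p => PySem.List.pySetD res p.2 (PySem.List.pyGetD res p.2 ([] : List Int) ++ [p.1]))
            (List.replicate (mx + 1).toNat ([] : List Int)))) (i := j) (a := ([] : List Int))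
      rw [List.getElem?_eq_getElem hjA] at hgA
      rw [hgA] at hA2
      rw [List.getElem?_eq_getElem hjB] at hB2
      simp only [Option.getD_some] at hA2
      exact hA2.trans (Option.some.inj hB2).symm
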